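-- pv_equiv track=rewrite | github.com/tanishkasahni/Hotel-Booking-System | ProgFunA1_s4175835.py | valid_apartment_id
-- ===== SOURCE A (Python) =====
-- def valid_apartment_id(ap_id):
--     """Apartment ID must start with 'U', followed by digits, then letters (e.g., U12swan)."""
--     if not ap_id.startswith("U"):
--         return False
--     digits = ""
--     letters = ""
--     for ch in ap_id[1:]:
--         if ch.isdigit() and not letters:
--             digits += ch
--         else:
--             letters += ch
--     return (digits.isdigit() and digits != "") and (letters.isalpha() and letters != "")
-- ===== SOURCE B (Python) =====
-- def valid_apartment_id(ap_id):
--     """Apartment ID must start with 'U', followed by digits, then letters (e.g., U12swan)."""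
--     if not ap_id.startswith("U"):
--         return False
--     rest = ap_id[1:]
--     i = 0
--     while i < len(rest) and rest[i].isdigit():
--         i += 1
--     return i > 0 and rest[i:].isalpha()
-- ===== Notes on version B (the rewrite author's own statement) =====
-- stated objective: simpler
-- what changed: Replaces the per-character accumulation into two growing strings with a split-then-validate decomposition: measure the leading digit run of ap_id[1:] with an index loop, then check the run is nonempty and the remainder is alphabetic.
import Mathlib
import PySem

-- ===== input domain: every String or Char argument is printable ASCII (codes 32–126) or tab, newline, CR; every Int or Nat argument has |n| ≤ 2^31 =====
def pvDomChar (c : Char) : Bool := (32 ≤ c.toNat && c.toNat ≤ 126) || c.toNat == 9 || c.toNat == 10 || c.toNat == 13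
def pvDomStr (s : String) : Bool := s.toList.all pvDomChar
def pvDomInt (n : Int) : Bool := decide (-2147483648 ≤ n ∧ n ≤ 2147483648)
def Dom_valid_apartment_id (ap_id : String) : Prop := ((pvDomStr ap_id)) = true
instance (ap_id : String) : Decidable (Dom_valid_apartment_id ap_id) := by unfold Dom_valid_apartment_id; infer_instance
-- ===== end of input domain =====

-- B is a simpler split-then-validate decomposition of the same check (same cost class); return value equivalence only.

-- ===== PORT A =====
-- A's loop accumulates two strings (digits, letters) character by character.
def valid_apartment_id (ap_id : String) : Bool :=
  if !(PySem.Str.startswith ap_id "U") then false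
  else
    let p := (PySem.Str.slice ap_id (some 1) none).toList.foldl
      (fun (p : List Char × List Char) ch =>
        if PySem.Chars.isdigit ch && p.2.isEmpty then (p.1 ++ [ch], p.2)
        else (p.1, p.2 ++ [ch]))
      ([], [])
    (PySem.Chars.strIsdigit p.1 && decide (p.1 ≠ [])) &&
      (PySem.Chars.strIsalpha p.2 && decide (p.2 ≠ []))

-- ===== PORT B =====
-- the while loop of Source B: length of the leading digit run
def pvDigitRun : List Char → Nat
  | [] => 0
  | c :: cs => if PySem.Chars.isdigit c then pvDigitRun cs + 1 else 0

def valid_apartment_id_alt (ap_id : String) : Bool :=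
  if !(PySem.Str.startswith ap_id "U") then false
  else
    let rest := (PySem.Str.slice ap_id (some 1) none).toList
    let i := pvDigitRun rest
    decide (0 < i) && PySem.Chars.strIsalpha (rest.drop i)

-- ===== PRECONDITION & SPEC =====
def Spec_valid_apartment_id (ap_id : String) (out : Bool) : Prop := out = valid_apartment_id_alt ap_id
instance (ap_id : String) (out : Bool) : Decidable (Spec_valid_apartment_id ap_id out) := by unfold Spec_valid_apartment_id; infer_instance

-- ===== CLAIM (what is proved, stated in full; the proofs are below) =====
def Claim_equal_valid_apartment_id : Prop := ∀ (ap_id : String), Dom_valid_apartment_id ap_id → Spec_valid_apartment_id ap_id (valid_apartment_id ap_id)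

-- ===== LEMMAS AND PROOFS =====

theorem pvFold_snd_ne (xs l1 l2 : List Char) (h : l2 ≠ []) :
    xs.foldl (fun (p : List Char × List Char) ch =>
        if PySem.Chars.isdigit ch && p.2.isEmpty then (p.1 ++ [ch], p.2)
        else (p.1, p.2 ++ [ch])) (l1, l2) = (l1, l2 ++ xs) := by
  induction xs generalizing l2 with
  | nil => simp
  | cons c cs ih =>
      simp only [List.foldl_cons]
      rw [if_neg (by simp [List.isEmpty_iff, h])]
      rw [ih (l2 ++ [c]) (by simp)]
      simp

theorem pvFold_spec (xs l1 : List Char) :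
    xs.foldl (fun (p : List Char × List Char) ch =>
        if PySem.Chars.isdigit ch && p.2.isEmpty then (p.1 ++ [ch], p.2)
        else (p.1, p.2 ++ [ch])) (l1, []) =
      (l1 ++ xs.takeWhile PySem.Chars.isdigit, xs.dropWhile PySem.Chars.isdigit) := by
  induction xs generalizing l1 with
  | nil => simp
  | cons c cs ih =>
      by_cases hd : PySem.Chars.isdigit c
      · simp only [List.foldl_cons, hd, List.isEmpty_nil, Bool.and_self, if_pos]
        rw [ih (l1 ++ [c])]
        simp [List.takeWhile_cons, List.dropWhile_cons, hd]
      · simp only [List.foldl_cons, hd, Bool.false_and, List.isEmpty_nil, Bool.false_eq_true,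
          if_false, List.nil_append]
        rw [pvFold_snd_ne cs l1 [c] (by simp)]
        simp [List.takeWhile_cons, List.dropWhile_cons, hd]

theorem pvDigitRun_eq (xs : List Char) :
    pvDigitRun xs = (xs.takeWhile PySem.Chars.isdigit).length := by
  induction xs with
  | nil => rfl
  | cons c cs ih =>
      by_cases hd : PySem.Chars.isdigit c <;>
        simp [pvDigitRun, List.takeWhile_cons, hd, ih]

theorem pvDrop_run (xs : List Char) :
    xs.drop (xs.takeWhile PySem.Chars.isdigit).length = xs.dropWhile PySem.Chars.isdigit := by
  induction xs with
  | nil => rfl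
  | cons c cs ih =>
      by_cases hd : PySem.Chars.isdigit c <;>
        simp [List.takeWhile_cons, List.dropWhile_cons, hd, ih]

theorem pvAll_takeWhile (xs : List Char) :
    (xs.takeWhile PySem.Chars.isdigit).all PySem.Chars.isdigit = true := by
  simp only [List.all_eq_true]
  intro c hc
  exact List.mem_takeWhile_imp hc

theorem pvTail_eq (xs : List Char) :
    ((PySem.Chars.strIsdigit (xs.foldl (fun (p : List Char × List Char) ch =>
        if PySem.Chars.isdigit ch && p.2.isEmpty then (p.1 ++ [ch], p.2)
        else (p.1, p.2 ++ [ch])) ([], [])).1 &&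
      decide ((xs.foldl (fun (p : List Char × List Char) ch =>
        if PySem.Chars.isdigit ch && p.2.isEmpty then (p.1 ++ [ch], p.2)
        else (p.1, p.2 ++ [ch])) ([], [])).1 ≠ [])) &&
     (PySem.Chars.strIsalpha (xs.foldl (fun (p : List Char × List Char) ch =>
        if PySem.Chars.isdigit ch && p.2.isEmpty then (p.1 ++ [ch], p.2)
        else (p.1, p.2 ++ [ch])) ([], [])).2 &&
      decide ((xs.foldl (fun (p : List Char × List Char) ch =>
        if PySem.Chars.isdigit ch && p.2.isEmpty then (p.1 ++ [ch], p.2)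
        else (p.1, p.2 ++ [ch])) ([], [])).2 ≠ []))) =
    (decide (0 < pvDigitRun xs) && PySem.Chars.strIsalpha (xs.drop (pvDigitRun xs))) := by
  rw [pvFold_spec xs [], pvDigitRun_eq, pvDrop_run]
  simp only [List.nil_append]
  have hall := pvAll_takeWhile xs
  by_cases h1 : xs.takeWhile PySem.Chars.isdigit = []
  · simp [h1, PySem.Chars.strIsdigit]
  · by_cases h2 : xs.dropWhile PySem.Chars.isdigit = [] <;>
      simp [h1, h2, PySem.Chars.strIsdigit, PySem.Chars.strIsalpha, hall,
        List.isEmpty_iff, List.length_pos_iff]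

-- ===== VERDICT (by name: the statement is the Claim_ definition above) =====
theorem valid_apartment_id_spec : Claim_equal_valid_apartment_id := by
  intro ap_id _
  unfold Spec_valid_apartment_id valid_apartment_id valid_apartment_id_alt
  by_cases hs : PySem.Str.startswith ap_id "U"
  · simp only [hs, Bool.not_true, Bool.false_eq_true, if_false]
    exact pvTail_eq _
  · have hs' : PySem.Str.startswith ap_id "U" = false := Bool.eq_false_iff.mpr hs
    simp only [hs', Bool.not_false, if_true]
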